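-- pv_equiv track=rewrite | github.com/jurajzachar/py-ds | py_ds/codility/passing_cars.py | solution
-- ===== SOURCE A (Python) =====
-- from typing import List, Tuple
--
-- def solution(a: List[int]) -> List[Tuple[int, int]]:
--     assert 0 < len(a) < (1000 * 1000), "array length out of bounds"
--
--     def generate_combinations(zero_pos: List[int], one_pos: List[int]) -> List[Tuple[int, int]]:
--         combinations = []
--         for x in zero_pos:
--             for y in one_pos:
--                 # only look forward
--                 if y[0] > x[0]:
--                     combinations.append((x[0], y[0]))
--         return combinations
--
--     res = len(generate_combinations([x for x in enumerate(a) if x[1] == 0], [x for x in enumerate(a) if x[1] == 1]))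
--
--     return res if res < (1000 * 1000) else - 1
-- ===== SOURCE B (Python) =====
-- def solution(a):
--     zeros = 0
--     total = 0
--     for v in a:
--         if v == 0:
--             zeros += 1
--         elif v == 1:
--             total += zeros
--     return total if total < (1000 * 1000) else -1
-- ===== Notes on version B (the rewrite author's own statement) =====
-- stated objective: faster
-- what changed: Replaced the materialised nested-loop list of all (zero-index, one-index) pairs with a single left-to-right pass keeping a running count of zeros added to the total at each 1.
import Mathlib
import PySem

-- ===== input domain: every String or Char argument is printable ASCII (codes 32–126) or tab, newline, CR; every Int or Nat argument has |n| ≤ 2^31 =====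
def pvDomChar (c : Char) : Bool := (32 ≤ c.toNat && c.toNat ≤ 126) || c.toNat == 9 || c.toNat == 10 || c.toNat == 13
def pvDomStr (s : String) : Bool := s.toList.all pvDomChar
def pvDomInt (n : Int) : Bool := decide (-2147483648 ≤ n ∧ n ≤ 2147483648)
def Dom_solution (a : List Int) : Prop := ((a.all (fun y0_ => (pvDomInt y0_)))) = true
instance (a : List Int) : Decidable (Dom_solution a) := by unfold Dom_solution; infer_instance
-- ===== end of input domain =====

-- B replaces A's materialised quadratic list of (zero-index, one-index) pairs by a single
-- linear pass keeping a running count of zeros added to the total at each 1.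

-- ===== PORT A =====
-- inner helper 'generate_combinations': nested loops appending (x[0], y[0]) when y[0] > x[0]
def solGen (zeroPos onePos : List (Int × Int)) : List (Int × Int) :=
  zeroPos.foldl (fun acc x =>
    onePos.foldl (fun acc2 y =>
      if y.1 > x.1 then acc2 ++ [(x.1, y.1)] else acc2) acc) []

def solution (a : List Int) : Int :=
  let zeroPos := (PySem.List.enumerate a).filter (fun x => x.2 == 0)
  let onePos := (PySem.List.enumerate a).filter (fun x => x.2 == 1)
  let res : Int := ((solGen zeroPos onePos).length : Int)
  if res < 1000 * 1000 then res else -1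

-- ===== PORT B =====
-- one pass: state (zeros seen so far, running total)
def solStep (s : Int × Int) (v : Int) : Int × Int :=
  if v == 0 then (s.1 + 1, s.2) else if v == 1 then (s.1, s.2 + s.1) else s

def solution_alt (a : List Int) : Int :=
  let st := a.foldl solStep (0, 0)
  if st.2 < 1000 * 1000 then st.2 else -1

-- ===== PRECONDITION & SPEC =====
-- Pre_ excludes exactly the inputs on which A's assert raises: the empty list and
-- lists of length ≥ 10^6 (AssertionError "array length out of bounds").
def Pre_solution (a : List Int) : Prop := 0 < a.length ∧ a.length < 1000 * 1000
instance (a : List Int) : Decidable (Pre_solution a) := by unfold Pre_solution; infer_instance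
def pvWitness_solution : List Int := [0, 2, 1]

def Spec_solution (a : List Int) (out : Int) : Prop := out = solution_alt a
instance (a : List Int) (out : Int) : Decidable (Spec_solution a out) := by unfold Spec_solution; infer_instance

-- ===== CLAIM (what is proved, stated in full; the proofs are below) =====
def Claim_equal_solution : Prop := ∀ (a : List Int), Dom_solution a → Pre_solution a → Spec_solution a (solution a)

-- ===== LEMMAS AND PROOFS =====

-- closed form for A's nested loop: a flatMap of filtered-and-mapped one positions
theorem solGen_eq (zs os : List (Int × Int)) :
    solGen zs os = zs.flatMap (fun x => (os.filter (fun y => y.1 > x.1)).map (fun y => (x.1, y.1))) := by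
  unfold solGen
  have h : ∀ (x : Int × Int) (acc : List (Int × Int)),
      os.foldl (fun acc2 y => if y.1 > x.1 then acc2 ++ [(x.1, y.1)] else acc2) acc
        = acc ++ (os.filter (fun y => y.1 > x.1)).map (fun y => (x.1, y.1)) := by
    intro x acc
    exact PySem.List.foldl_append_ite (fun y => y.1 > x.1) (fun y => (x.1, y.1)) os acc
  simp only [h]
  simpa using PySem.List.foldl_append_eq_flatMap
    (fun x => (os.filter (fun y => y.1 > x.1)).map (fun y => (x.1, y.1))) zs []

-- every index in enumerate l is below the length
theorem enum_fst_lt (l : List Int) (p : Int × Int) (hp : p ∈ PySem.List.enumerate l) :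
    p.1 < (l.length : Int) := by
  rcases (PySem.List.mem_enumerate_iff l 0 p).1 hp with ⟨k, hk, rfl⟩
  simp
  omega

-- length of a flatMap where each piece gains exactly one element
theorem flatMap_len_succ {α β : Type} (L : List α) (g g' : α → List β)
    (hgg : ∀ x ∈ L, (g x).length = (g' x).length + 1) :
    ((L.flatMap g).length : Int) = ((L.flatMap g').length : Int) + L.length := by
  induction L with
  | nil => simp
  | cons hd tl ihl =>
    simp only [List.flatMap_cons, List.length_append, List.length_cons]
    have h1 := hgg hd (by simp)
    have h2 := ihl (fun x hx => hgg x (by simp [hx]))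
    push_cast
    omega

-- main invariant, by reverse induction
theorem main_inv (a : List Int) :
    (a.foldl solStep (0, 0)).1
        = (((PySem.List.enumerate a).filter (fun x => x.2 == 0)).length : Int)
    ∧ (a.foldl solStep (0, 0)).2
        = ((solGen ((PySem.List.enumerate a).filter (fun x => x.2 == 0))
                   ((PySem.List.enumerate a).filter (fun x => x.2 == 1))).length : Int) := by
  induction a using List.reverseRecOn with
  | nil => simp [solGen]
  | append_singleton l v ih =>
    obtain ⟨ih1, ih2⟩ := ih
    have hen : PySem.List.enumerate (l ++ [v])
        = PySem.List.enumerate l ++ [((l.length : Int), v)] := by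
      simpa using PySem.List.enumerate_append l [v] 0
    have hall : ∀ x ∈ (PySem.List.enumerate l).filter (fun x => x.2 == 0),
        ((l.length : Int) > x.1) := by
      intro x hx
      exact enum_fst_lt l x (List.mem_of_mem_filter hx)
    rw [List.foldl_append, hen]
    simp only [List.foldl_cons, List.foldl_nil]
    by_cases h0 : v = 0
    · subst h0
      constructor
      · simp [solStep, List.filter_append, ih1]
      · -- appended zero at index len l contributes no pair: no one-index exceeds it
        simp only [solStep, if_pos (show ((0:Int) == 0) = true by decide)]
        rw [ih2]
        simp only [List.filter_append]
        have honef : ([((l.length : Int), (0:Int))].filter (fun x => x.2 == 1)) = [] := by simp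
        have hzf : ([((l.length : Int), (0:Int))].filter (fun x => x.2 == 0))
            = [((l.length : Int), (0:Int))] := by simp
        rw [honef, hzf, List.append_nil]
        rw [solGen_eq, solGen_eq, List.flatMap_append]
        have hnil : ((((PySem.List.enumerate l).filter (fun x => x.2 == 1)).filter
            (fun y => y.1 > (l.length : Int))).map
              (fun y => (((l.length : Int), (0:Int)).1, y.1))) = [] := by
          have : (((PySem.List.enumerate l).filter (fun x => x.2 == 1)).filter
              (fun y => y.1 > (l.length : Int))) = [] := by
            rw [List.filter_eq_nil_iff]
            intro y hy
            have := enum_fst_lt l y (List.mem_of_mem_filter hy)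
            simp
            omega
          rw [this]; simp
        simp only [List.flatMap_cons, List.flatMap_nil, hnil, List.append_nil]
    · by_cases h1 : v = 1
      · subst h1
        constructor
        · simp [solStep, List.filter_append, ih1]
        · -- appended one at index len l pairs with every earlier zero
          simp only [solStep]
          rw [if_neg (show ¬((1:Int) == 0) = true by decide), if_pos (show ((1:Int) == 1) = true by decide)]
          rw [ih2, ih1]
          simp only [List.filter_append]
          have honef : ([((l.length : Int), (1:Int))].filter (fun x => x.2 == 1))
              = [((l.length : Int), (1:Int))] := by simp
          have hzf : ([((l.length : Int), (1:Int))].filter (fun x => x.2 == 0)) = [] := by simp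
          rw [honef, hzf, List.append_nil]
          rw [solGen_eq, solGen_eq]
          have := flatMap_len_succ ((PySem.List.enumerate l).filter (fun x => x.2 == 0))
            (fun x => ((((PySem.List.enumerate l).filter (fun x => x.2 == 1))
                ++ [((l.length : Int), (1:Int))]).filter (fun y => y.1 > x.1)).map
                  (fun y => (x.1, y.1)))
            (fun x => (((PySem.List.enumerate l).filter (fun x => x.2 == 1)).filter
                (fun y => y.1 > x.1)).map (fun y => (x.1, y.1)))
            (by
              intro x hx
              simp [List.filter_append, hall x hx])
          rw [this]
      · constructor
        · simp [solStep, h0, h1, List.filter_append, ih1]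
        · simp [solStep, h0, h1, List.filter_append]
          exact ih2

-- ===== VERDICT (by name: the statement is the Claim_ definition above) =====
theorem solution_spec : Claim_equal_solution := by
  intro a _ _
  unfold Spec_solution solution solution_alt
  have h := (main_inv a).2
  simp only []
  rw [solGen_eq] at h ⊢
  rw [← h]
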